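-- pv_equiv track=rewrite | github.com/jatkinson1000/archerycalculator | archerycalculator/utils.py | order_rounds
-- ===== SOURCE A (Python) =====
-- def order_rounds(rounds):
--     """
--     Given an iterator of rounds, sort them into an approved order.
--
--     Parameters
--     ----------
--     rounds : dict of str:str
--         dictionary of round codenames mapped to their family
--
--     Returns
--     -------
--     sorted_rounds : dict of str:str
--         dict of sorted rounds input dict
--
--     """
--     # Sort by family - rounds should already sorted within families. and filtered.
--     order = [
--         # OUTDOOR
--         "york_hereford_bristol",
--         "stgeorge_albion_windsor",
--         "national",
--         "western",
--         "warwick",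
--         "american",
--         "stnicholas",
--         "wa1440",
--         "metric1440",
--         "wa900",
--         # 720 have special treatment
--         "720",
--         "metriclong",
--         "metricshort",
--         # INDOOR
--         # FIELD
--         "wafield_24_marked",
--         "wafield_24_unmarked",
--         "wafield_24_mixed",
--         "wafield_12_marked",
--         "wafield_12_unmarked",
--         "wafield_12_mixed",
--         "ifaafield",
--     ]
--
--     sorted_rounds = {}
--     for family in order:
--         if family == "720":
--             # Special treatment needed to sort the wa720 and metric720 families
--             sorted_rounds.update(
--                 {
--                     key: value
--                     for (key, value) in rounds.items()
--                     if value == "wa720" and "wa720_50_c" not in key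
--                 }
--             )
--             sorted_rounds.update(
--                 {
--                     key: value
--                     for (key, value) in rounds.items()
--                     if value == "metric720" and "metric_80" not in key
--                 }
--             )
--             sorted_rounds.update(
--                 {
--                     key: value
--                     for (key, value) in rounds.items()
--                     if value == "wa720" and "wa720_50_c" in key
--                 }
--             )
--             sorted_rounds.update(
--                 {
--                     key: value
--                     for (key, value) in rounds.items()
--                     if value == "metric720" and "metric_80" in key
--                 }
--             )
--         elif family == "ifaafield":
--             # Select full rounds first, then units
--             sorted_rounds.update(
--                 {key: value for (key, value) in rounds.items() if "unit" not in key}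
--             )
--         else:
--             sorted_rounds.update(
--                 {key: value for (key, value) in rounds.items() if value == family}
--             )
--
--     # Catch any rounds in the list that are not included in the families listed above
--     sorted_rounds.update({codename: rounds[codename] for codename in rounds})
--
--     return sorted_rounds
-- ===== SOURCE B (Python) =====
-- # Single pass: tag each round with the numeric rank of the first ordering rule it
-- # satisfies, group into buckets keyed by rank, then emit buckets in rank order.
-- _SIMPLE = {
--     "york_hereford_bristol": 0,
--     "stgeorge_albion_windsor": 1,
--     "national": 2,
--     "western": 3,
--     "warwick": 4,
--     "american": 5,
--     "stnicholas": 6,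
--     "wa1440": 7,
--     "metric1440": 8,
--     "wa900": 9,
--     "metriclong": 14,
--     "metricshort": 15,
--     "wafield_24_marked": 16,
--     "wafield_24_unmarked": 17,
--     "wafield_24_mixed": 18,
--     "wafield_12_marked": 19,
--     "wafield_12_unmarked": 20,
--     "wafield_12_mixed": 21,
-- }
--
--
-- def _priority(key, value):
--     if value == "wa720":
--         return 12 if "wa720_50_c" in key else 10
--     if value == "metric720":
--         return 13 if "metric_80" in key else 11
--     p = _SIMPLE.get(value)
--     if p is not None:
--         return p
--     return 23 if "unit" in key else 22
--
--
-- def order_rounds(rounds):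
--     tagged = [(_priority(key, value), (key, value)) for (key, value) in rounds.items()]
--     buckets = {}
--     for p, kv in tagged:
--         buckets.setdefault(p, []).append(kv)
--     return dict(kv for p in range(24) for kv in buckets.get(p, []))
-- ===== Notes on version B (the rewrite author's own statement) =====
-- stated objective: alternative
-- what changed: A makes 26 filtering passes over the dict (one per family slot, four for the 720 block, plus the ifaafield and catch-all passes); B makes a single pass that tags every round with the rank of the first ordering rule it satisfies, groups the rounds into buckets keyed by that rank, and concatenates the buckets in rank order.
import Mathlib
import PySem

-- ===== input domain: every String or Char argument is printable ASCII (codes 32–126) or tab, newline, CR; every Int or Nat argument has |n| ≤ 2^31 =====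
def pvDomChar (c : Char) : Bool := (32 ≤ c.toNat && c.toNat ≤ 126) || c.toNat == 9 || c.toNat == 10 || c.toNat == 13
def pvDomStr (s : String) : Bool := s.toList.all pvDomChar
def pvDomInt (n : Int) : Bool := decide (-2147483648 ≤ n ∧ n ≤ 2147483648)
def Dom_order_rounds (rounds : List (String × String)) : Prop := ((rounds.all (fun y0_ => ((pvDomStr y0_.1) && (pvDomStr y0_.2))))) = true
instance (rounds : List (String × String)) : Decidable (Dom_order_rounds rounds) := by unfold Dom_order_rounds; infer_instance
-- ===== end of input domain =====

-- B replaces A's 26 filtering passes over the rounds dict by one pass that tags each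
-- round with the rank of the first ordering rule it satisfies, groups rounds into
-- buckets keyed by that rank, and concatenates the buckets in rank order.

-- ===== PORT A =====
def pvAOrder : List String :=
  ["york_hereford_bristol", "stgeorge_albion_windsor", "national", "western",
   "warwick", "american", "stnicholas", "wa1440", "metric1440", "wa900",
   "720", "metriclong", "metricshort",
   "wafield_24_marked", "wafield_24_unmarked", "wafield_24_mixed",
   "wafield_12_marked", "wafield_12_unmarked", "wafield_12_mixed", "ifaafield"]

-- sorted_rounds.update({k: v for (k, v) in rounds.items() if <pred>}); the
-- comprehension's keys are distinct (Pre_: rounds is a dict), so the update is a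
-- fold of inserts over the filtered items — exact under Pre_order_rounds.
def pvUpd (d : PySem.Dict String String) (l : List (String × String)) : PySem.Dict String String :=
  l.foldl (fun d kv => d.insert kv.1 kv.2) d

def order_rounds (rounds : List (String × String)) : List (String × String) :=
  let d := pvAOrder.foldl (fun d family =>
    if family = "720" then
      let d := pvUpd d (rounds.filter (fun kv => decide (kv.2 = "wa720") && !(PySem.Str.isIn "wa720_50_c" kv.1)))
      let d := pvUpd d (rounds.filter (fun kv => decide (kv.2 = "metric720") && !(PySem.Str.isIn "metric_80" kv.1)))
      let d := pvUpd d (rounds.filter (fun kv => decide (kv.2 = "wa720") && PySem.Str.isIn "wa720_50_c" kv.1))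
      pvUpd d (rounds.filter (fun kv => decide (kv.2 = "metric720") && PySem.Str.isIn "metric_80" kv.1))
    else if family = "ifaafield" then
      pvUpd d (rounds.filter (fun kv => !(PySem.Str.isIn "unit" kv.1)))
    else
      pvUpd d (rounds.filter (fun kv => decide (kv.2 = family)))) PySem.Dict.empty
  -- sorted_rounds.update({codename: rounds[codename] for codename in rounds})
  let d := rounds.foldl (fun d kv => d.insert kv.1 ((PySem.Dict.ofList rounds).getD kv.1 "")) d
  d.items

-- ===== PORT B =====
def pvSimple : PySem.Dict String Nat := PySem.Dict.ofList
  [("york_hereford_bristol", 0), ("stgeorge_albion_windsor", 1), ("national", 2),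
   ("western", 3), ("warwick", 4), ("american", 5), ("stnicholas", 6),
   ("wa1440", 7), ("metric1440", 8), ("wa900", 9), ("metriclong", 14),
   ("metricshort", 15), ("wafield_24_marked", 16), ("wafield_24_unmarked", 17),
   ("wafield_24_mixed", 18), ("wafield_12_marked", 19), ("wafield_12_unmarked", 20),
   ("wafield_12_mixed", 21)]

-- _priority: always in 0..23, so Nat is exact for the Python int
def prioAlt (key value : String) : Nat :=
  if value = "wa720" then (if PySem.Str.isIn "wa720_50_c" key then 12 else 10)
  else if value = "metric720" then (if PySem.Str.isIn "metric_80" key then 13 else 11)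
  else match pvSimple.get? value with
    | some p => p
    | none => if PySem.Str.isIn "unit" key then 23 else 22

def order_rounds_alt (rounds : List (String × String)) : List (String × String) :=
  let tagged := rounds.map (fun kv => (prioAlt kv.1 kv.2, kv))
  -- buckets.setdefault(p, []).append(kv)  ≡  buckets[p] = buckets.get(p, []) + [kv]
  let buckets := tagged.foldl (fun d p => d.modify p.1 [] (· ++ [p.2])) PySem.Dict.empty
  -- dict(kv for p in range(24) for kv in buckets.get(p, [])); the ranks 0..23 are Nats
  (((List.range 24).flatMap (fun p => buckets.getD p [])).foldl
    (fun d kv => d.insert kv.1 kv.2) PySem.Dict.empty).items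


-- ===== PRECONDITION & SPEC =====
-- Pre_ excludes association lists with duplicate keys: they do not encode a Python
-- dict (the parameter of both A and B is a dict, whose keys are necessarily distinct).
def Pre_order_rounds (rounds : List (String × String)) : Prop :=
  (rounds.map Prod.fst).Nodup
instance (rounds : List (String × String)) : Decidable (Pre_order_rounds rounds) := by
  unfold Pre_order_rounds; infer_instance

def pvWitness_order_rounds : (List (String × String)) :=
  [("national_x", "national"), ("wa720_50_c_1", "wa720"), ("ifaa_unit_1", "ifaafield")]

def Spec_order_rounds (rounds : List (String × String)) (out : List (String × String)) : Prop := out = order_rounds_alt rounds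
instance (rounds : List (String × String)) (out : List (String × String)) : Decidable (Spec_order_rounds rounds out) := by unfold Spec_order_rounds; infer_instance

-- ===== CLAIM (what is proved, stated in full; the proofs are below) =====
def Claim_equal_order_rounds : Prop := ∀ (rounds : List (String × String)), Dom_order_rounds rounds → Pre_order_rounds rounds → Spec_order_rounds rounds (order_rounds rounds)

-- ===== LEMMAS AND PROOFS =====
def pvPr (kv : String × String) : Nat := prioAlt kv.1 kv.2
def pvGrp (r : List (String × String)) (p : Nat) : List (String × String) := r.filter (fun kv => decide (pvPr kv = p))


def pvSimpleList : List (String × Nat) :=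
  [("york_hereford_bristol", 0), ("stgeorge_albion_windsor", 1), ("national", 2),
   ("western", 3), ("warwick", 4), ("american", 5), ("stnicholas", 6),
   ("wa1440", 7), ("metric1440", 8), ("wa900", 9), ("metriclong", 14),
   ("metricshort", 15), ("wafield_24_marked", 16), ("wafield_24_unmarked", 17),
   ("wafield_24_mixed", 18), ("wafield_12_marked", 19), ("wafield_12_unmarked", 20),
   ("wafield_12_mixed", 21)]

lemma pvSimple_items : pvSimple.items = pvSimpleList := by decide

lemma proj_inj {α β : Type} (f : α → β) {l : List α} (h : (l.map f).Nodup) {a b : α}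
    (ha : a ∈ l) (hb : b ∈ l) (he : f a = f b) : a = b := by
  induction l with
  | nil => cases ha
  | cons x t ih =>
    rw [List.map_cons, List.nodup_cons] at h
    rcases List.mem_cons.mp ha with rfl | ha' <;> rcases List.mem_cons.mp hb with rfl | hb'
    · rfl
    · have hm : f b ∈ t.map f := List.mem_map_of_mem hb'
      rw [← he] at hm; exact absurd hm h.1
    · have hm : f a ∈ t.map f := List.mem_map_of_mem ha'
      rw [he] at hm; exact absurd hm h.1
    · exact ih h.2 ha' hb'

lemma pvSimple_mem {v : String} {q : Nat} (h : pvSimple.get? v = some q) : (v, q) ∈ pvSimpleList := by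
  rw [← pvSimple_items]
  exact PySem.Dict.mem_items_of_get?_eq_some _ h

lemma pvSimple_range {v : String} {q : Nat} (h : pvSimple.get? v = some q) :
    q < 22 ∧ q ≠ 10 ∧ q ≠ 11 ∧ q ≠ 12 ∧ q ≠ 13 := by
  have hm := List.mem_map_of_mem (f := Prod.snd) (pvSimple_mem h)
  simp only [pvSimpleList, List.map_cons, List.map_nil, List.mem_cons, List.not_mem_nil, or_false] at hm
  rcases hm with h' | h' | h' | h' | h' | h' | h' | h' | h' | h' | h' | h' | h' | h' | h' | h' | h' | h' <;> omega

lemma pvSimple_val_inj {v : String} {q : Nat} (h : pvSimple.get? v = some q)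
    {fam : String} (hf : pvSimple.get? fam = some q) : v = fam := by
  have := proj_inj Prod.snd (l := pvSimpleList) (by decide) (pvSimple_mem h) (pvSimple_mem hf) rfl
  exact congrArg Prod.fst this

lemma pvPr_wa720 {kv : String × String} (h : kv.2 = "wa720") :
    pvPr kv = if PySem.Str.isIn "wa720_50_c" kv.1 then 12 else 10 := by
  unfold pvPr prioAlt; rw [if_pos h]

lemma pvPr_m720 {kv : String × String} (h1 : kv.2 ≠ "wa720") (h : kv.2 = "metric720") :
    pvPr kv = if PySem.Str.isIn "metric_80" kv.1 then 13 else 11 := by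
  unfold pvPr prioAlt; rw [if_neg h1, if_pos h]

lemma pvPr_get {kv : String × String} {q : Nat} (h1 : kv.2 ≠ "wa720") (h2 : kv.2 ≠ "metric720")
    (hq : pvSimple.get? kv.2 = some q) : pvPr kv = q := by
  unfold pvPr prioAlt; rw [if_neg h1, if_neg h2, hq]

lemma pvPr_none {kv : String × String} (h1 : kv.2 ≠ "wa720") (h2 : kv.2 ≠ "metric720")
    (hq : pvSimple.get? kv.2 = none) :
    pvPr kv = if PySem.Str.isIn "unit" kv.1 then 23 else 22 := by
  unfold pvPr prioAlt; rw [if_neg h1, if_neg h2, hq]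

lemma pvSimple_wa720 : pvSimple.get? "wa720" = none := by decide
lemma pvSimple_m720 : pvSimple.get? "metric720" = none := by decide

lemma pvPr_lt (kv : String × String) : pvPr kv < 24 := by
  by_cases c1 : kv.2 = "wa720"
  · rw [pvPr_wa720 c1]; split <;> omega
  by_cases c2 : kv.2 = "metric720"
  · rw [pvPr_m720 c1 c2]; split <;> omega
  rcases hq : pvSimple.get? kv.2 with _ | q
  · rw [pvPr_none c1 c2 hq]; split <;> omega
  · rw [pvPr_get c1 c2 hq]; exact Nat.lt_of_lt_of_le (pvSimple_range hq).1 (by omega)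

lemma pw_simple (fam : String) (p : Nat) (hf : pvSimple.get? fam = some p) (kv : String × String) :
    (decide (kv.2 = fam)) = (decide (pvPr kv = p)) := by
  have hfw : fam ≠ "wa720" := fun he => by rw [he, pvSimple_wa720] at hf; cases hf
  have hfm : fam ≠ "metric720" := fun he => by rw [he, pvSimple_m720] at hf; cases hf
  have hrange := pvSimple_range hf
  by_cases hv : kv.2 = fam
  · have : pvPr kv = p := pvPr_get (hv ▸ hfw) (hv ▸ hfm) (hv ▸ hf)
    simp [hv, this]
  · rw [decide_eq_false hv]; symm
    apply decide_eq_false; intro hE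
    by_cases c1 : kv.2 = "wa720"
    · rw [pvPr_wa720 c1] at hE; split at hE <;> omega
    by_cases c2 : kv.2 = "metric720"
    · rw [pvPr_m720 c1 c2] at hE; split at hE <;> omega
    rcases hq : pvSimple.get? kv.2 with _ | q
    · rw [pvPr_none c1 c2 hq] at hE; split at hE <;> omega
    · rw [pvPr_get c1 c2 hq] at hE; subst hE
      exact hv (pvSimple_val_inj hq hf)

lemma pw_10 (kv : String × String) :
    (decide (kv.2 = "wa720") && !(PySem.Str.isIn "wa720_50_c" kv.1)) = (decide (pvPr kv = 10)) := by
  by_cases c1 : kv.2 = "wa720"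
  · rw [pvPr_wa720 c1]
    rcases hin : PySem.Str.isIn "wa720_50_c" kv.1
    · simp [c1]
    · simp
  · rw [decide_eq_false c1, Bool.false_and]; symm
    apply decide_eq_false; intro hE
    by_cases c2 : kv.2 = "metric720"
    · rw [pvPr_m720 c1 c2] at hE; split at hE <;> omega
    rcases hq : pvSimple.get? kv.2 with _ | q
    · rw [pvPr_none c1 c2 hq] at hE; split at hE <;> omega
    · rw [pvPr_get c1 c2 hq] at hE
      have := pvSimple_range hq; omega

lemma pw_12 (kv : String × String) :
    (decide (kv.2 = "wa720") && PySem.Str.isIn "wa720_50_c" kv.1) = (decide (pvPr kv = 12)) := by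
  by_cases c1 : kv.2 = "wa720"
  · rw [pvPr_wa720 c1]
    rcases hin : PySem.Str.isIn "wa720_50_c" kv.1
    · simp
    · simp [c1]
  · rw [decide_eq_false c1, Bool.false_and]; symm
    apply decide_eq_false; intro hE
    by_cases c2 : kv.2 = "metric720"
    · rw [pvPr_m720 c1 c2] at hE; split at hE <;> omega
    rcases hq : pvSimple.get? kv.2 with _ | q
    · rw [pvPr_none c1 c2 hq] at hE; split at hE <;> omega
    · rw [pvPr_get c1 c2 hq] at hE
      have := pvSimple_range hq; omega

lemma pw_11 (kv : String × String) :
    (decide (kv.2 = "metric720") && !(PySem.Str.isIn "metric_80" kv.1)) = (decide (pvPr kv = 11)) := by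
  by_cases c2 : kv.2 = "metric720"
  · by_cases c1 : kv.2 = "wa720"
    · exact absurd (c1.symm.trans c2) (by decide)
    rw [pvPr_m720 c1 c2]
    rcases hin : PySem.Str.isIn "metric_80" kv.1
    · simp [c2]
    · simp
  · rw [decide_eq_false c2, Bool.false_and]; symm
    apply decide_eq_false; intro hE
    by_cases c1 : kv.2 = "wa720"
    · rw [pvPr_wa720 c1] at hE; split at hE <;> omega
    rcases hq : pvSimple.get? kv.2 with _ | q
    · rw [pvPr_none c1 c2 hq] at hE; split at hE <;> omega
    · rw [pvPr_get c1 c2 hq] at hE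
      have := pvSimple_range hq; omega

lemma pw_13 (kv : String × String) :
    (decide (kv.2 = "metric720") && PySem.Str.isIn "metric_80" kv.1) = (decide (pvPr kv = 13)) := by
  by_cases c2 : kv.2 = "metric720"
  · by_cases c1 : kv.2 = "wa720"
    · exact absurd (c1.symm.trans c2) (by decide)
    rw [pvPr_m720 c1 c2]
    rcases hin : PySem.Str.isIn "metric_80" kv.1
    · simp
    · simp [c2]
  · rw [decide_eq_false c2, Bool.false_and]; symm
    apply decide_eq_false; intro hE
    by_cases c1 : kv.2 = "wa720"
    · rw [pvPr_wa720 c1] at hE; split at hE <;> omega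
    rcases hq : pvSimple.get? kv.2 with _ | q
    · rw [pvPr_none c1 c2 hq] at hE; split at hE <;> omega
    · rw [pvPr_get c1 c2 hq] at hE
      have := pvSimple_range hq; omega

lemma pw_22 (kv : String × String) :
    (!(PySem.Str.isIn "unit" kv.1) && !(decide (pvPr kv < 22))) = (decide (pvPr kv = 22)) := by
  by_cases c1 : kv.2 = "wa720"
  · rw [pvPr_wa720 c1]
    rcases hin : PySem.Str.isIn "wa720_50_c" kv.1 <;> simp
  by_cases c2 : kv.2 = "metric720"
  · rw [pvPr_m720 c1 c2]
    rcases hin : PySem.Str.isIn "metric_80" kv.1 <;> simp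
  rcases hq : pvSimple.get? kv.2 with _ | q
  · rw [pvPr_none c1 c2 hq]
    rcases hu : PySem.Str.isIn "unit" kv.1 <;> simp
  · rw [pvPr_get c1 c2 hq]
    have := pvSimple_range hq
    have h1 : decide (q < 22) = true := by simp; omega
    have h2 : decide (q = 22) = false := by simp; omega
    rw [h1, h2]; simp

lemma pw_23 (kv : String × String) :
    (!(decide (pvPr kv < 23))) = (decide (pvPr kv = 23)) := by
  have := pvPr_lt kv
  by_cases h : pvPr kv < 23
  · rw [decide_eq_true h]; symm; simp; omega
  · rw [decide_eq_false h]; symm; simp; omega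

lemma pvUpd_append (d : PySem.Dict String String) (l1 l2 : List (String × String)) :
    pvUpd (pvUpd d l1) l2 = pvUpd d (l1 ++ l2) := by
  unfold pvUpd; rw [List.foldl_append]

lemma insert_same {d : PySem.Dict String String} {k v : String}
    (hnd : d.keys.Nodup) (h : d.get? k = some v) : d.insert k v = d := by
  have hc : d.contains k = true := by rw [PySem.Dict.contains_eq_isSome_get?, h]; rfl
  apply PySem.Dict.ext
  rw [PySem.Dict.items_insert_of_contains _ _ hc]
  have hpt : ∀ p ∈ d.items, (if p.1 == k then (k, v) else p) = p := by
    intro p hp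
    by_cases hpk : p.1 = k
    · have hg : d.get? p.1 = some p.2 := PySem.Dict.get?_of_mem_items _ (by simpa using hp) hnd
      rw [hpk, h] at hg
      have hv : v = p.2 := by cases hg; rfl
      have hb : (p.1 == k) = true := by simp [hpk]
      rw [if_pos hb, ← hpk, hv]
    · have hb : (p.1 == k) = false := by simp [hpk]
      rw [if_neg (by simp [hb])]
  rw [List.map_congr_left hpt]
  exact List.map_id _

lemma upd_items (l : List (String × String)) (d : PySem.Dict String String)
    (hnd : d.keys.Nodup) (hl : (l.map Prod.fst).Nodup)
    (h : ∀ kv ∈ l, d.contains kv.1 = true → d.get? kv.1 = some kv.2) :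
    (pvUpd d l).items = d.items ++ l.filter (fun kv => !d.contains kv.1) := by
  induction l generalizing d with
  | nil => simp [pvUpd]
  | cons kv t ih =>
    rw [List.map_cons, List.nodup_cons] at hl
    show (pvUpd (d.insert kv.1 kv.2) t).items = _
    by_cases hc : d.contains kv.1 = true
    · rw [insert_same hnd (h kv List.mem_cons_self hc)]
      rw [ih d hnd hl.2 (fun kv' hm hk => h kv' (List.mem_cons_of_mem _ hm) hk)]
      rw [List.filter_cons]; simp [hc]
    · have hcf : d.contains kv.1 = false := by simpa using hc
      have hne : ∀ kv' ∈ t, kv'.1 ≠ kv.1 := fun kv' hm heq => hl.1 (heq ▸ List.mem_map_of_mem hm)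
      have h1 : (d.insert kv.1 kv.2).keys.Nodup := PySem.Dict.nodup_keys_insert _ _ _ hnd
      have h2 : ∀ kv' ∈ t, (d.insert kv.1 kv.2).contains kv'.1 = true →
          (d.insert kv.1 kv.2).get? kv'.1 = some kv'.2 := by
        intro kv' hm hk
        rw [PySem.Dict.get?_insert_of_ne _ _ (hne kv' hm)]
        apply h kv' (List.mem_cons_of_mem _ hm)
        rw [PySem.Dict.contains_insert] at hk
        have hb : (kv'.1 == kv.1) = false := by simpa using hne kv' hm
        simpa [hb] using hk
      rw [ih _ h1 hl.2 h2]
      rw [PySem.Dict.items_insert_of_not_contains _ _ hcf]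
      have hfc : t.filter (fun kv' => !(d.insert kv.1 kv.2).contains kv'.1)
          = t.filter (fun kv' => !d.contains kv'.1) := by
        apply List.filter_congr
        intro kv' hm
        rw [PySem.Dict.contains_insert]
        have hb : (kv'.1 == kv.1) = false := by simpa using hne kv' hm
        simp [hb]
      rw [hfc, List.filter_cons]
      simp [hcf, List.append_assoc]

lemma filter_or_perm {α : Type} (p q : α → Bool) (xs : List α)
    (hdisj : ∀ x ∈ xs, ¬(p x = true ∧ q x = true)) :
    (xs.filter p ++ xs.filter q).Perm (xs.filter (fun x => p x || q x)) := by
  induction xs with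
  | nil => simp
  | cons x t ih =>
    have ih' := ih (fun y hy => hdisj y (List.mem_cons_of_mem _ hy))
    rw [List.filter_cons, List.filter_cons, List.filter_cons]
    by_cases hp : p x = true
    · have hq : q x = false := by
        rcases hq : q x with _ | _
        · rfl
        · exact absurd ⟨hp, hq⟩ (hdisj x List.mem_cons_self)
      simp only [hp, hq, Bool.false_eq_true, if_false, if_true, Bool.true_or, List.cons_append]
      exact ih'.cons x
    · have hp' : p x = false := by simpa using hp
      by_cases hq : q x = true
      · simp only [hp', hq, Bool.false_eq_true, if_false, if_true, Bool.false_or]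
        exact List.Perm.trans List.perm_middle (ih'.cons x)
      · have hq' : q x = false := by simpa using hq
        simp only [hp', hq', Bool.false_eq_true, if_false, Bool.false_or]
        exact ih'

lemma flat_grp_perm (r : List (String × String)) (n : Nat) :
    ((List.range n).flatMap (pvGrp r)).Perm (r.filter (fun kv => decide (pvPr kv < n))) := by
  induction n with
  | zero => simp
  | succ n ih =>
    rw [List.range_succ, List.flatMap_append, List.flatMap_cons, List.flatMap_nil, List.append_nil]
    refine List.Perm.trans (ih.append_right _) (List.Perm.trans (filter_or_perm _ _ _ ?_) ?_)
    · intro kv _ hcon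
      have h1 := of_decide_eq_true hcon.1
      have h2 := of_decide_eq_true hcon.2
      omega
    · have : ∀ kv ∈ r, (decide (pvPr kv < n) || decide (pvPr kv = n)) = decide (pvPr kv < n + 1) := by
        intro kv _
        rw [← Bool.decide_or]
        exact decide_eq_decide.mpr (by omega)
      rw [List.filter_congr this]

lemma concat22 (r : List (String × String)) :
    (pvGrp r 0 ++ (pvGrp r 1 ++ (pvGrp r 2 ++ (pvGrp r 3 ++ (pvGrp r 4 ++ (pvGrp r 5 ++ (pvGrp r 6 ++ (pvGrp r 7 ++ (pvGrp r 8 ++ (pvGrp r 9 ++ (pvGrp r 10 ++ (pvGrp r 11 ++ (pvGrp r 12 ++ (pvGrp r 13 ++ (pvGrp r 14 ++ (pvGrp r 15 ++ (pvGrp r 16 ++ (pvGrp r 17 ++ (pvGrp r 18 ++ (pvGrp r 19 ++ (pvGrp r 20 ++ pvGrp r 21))))))))))))))))))))) = (List.range 22).flatMap (pvGrp r) := by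
  simp [List.range_succ, List.flatMap_cons, List.flatMap_nil, List.append_nil]

lemma chain22 (r : List (String × String)) :
    (pvUpd (pvUpd (pvUpd (pvUpd (pvUpd (pvUpd (pvUpd (pvUpd (pvUpd (pvUpd (pvUpd (pvUpd (pvUpd (pvUpd (pvUpd (pvUpd (pvUpd (pvUpd (pvUpd (pvUpd (pvUpd (pvUpd PySem.Dict.empty (pvGrp r 0)) (pvGrp r 1)) (pvGrp r 2)) (pvGrp r 3)) (pvGrp r 4)) (pvGrp r 5)) (pvGrp r 6)) (pvGrp r 7)) (pvGrp r 8)) (pvGrp r 9)) (pvGrp r 10)) (pvGrp r 11)) (pvGrp r 12)) (pvGrp r 13)) (pvGrp r 14)) (pvGrp r 15)) (pvGrp r 16)) (pvGrp r 17)) (pvGrp r 18)) (pvGrp r 19)) (pvGrp r 20)) (pvGrp r 21)) = pvUpd PySem.Dict.empty ((List.range 22).flatMap (pvGrp r)) := by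
  rw [pvUpd_append, pvUpd_append, pvUpd_append, pvUpd_append, pvUpd_append, pvUpd_append, pvUpd_append, pvUpd_append, pvUpd_append, pvUpd_append, pvUpd_append, pvUpd_append, pvUpd_append, pvUpd_append, pvUpd_append, pvUpd_append, pvUpd_append, pvUpd_append, pvUpd_append, pvUpd_append, pvUpd_append]
  rw [concat22 r]

lemma orderA (r : List (String × String)) :
    order_rounds r = (r.foldl (fun d kv => d.insert kv.1 ((PySem.Dict.ofList r).getD kv.1 "")) (pvUpd (pvUpd (pvUpd (pvUpd (pvUpd (pvUpd (pvUpd (pvUpd (pvUpd (pvUpd (pvUpd (pvUpd (pvUpd (pvUpd (pvUpd (pvUpd (pvUpd (pvUpd (pvUpd (pvUpd (pvUpd (pvUpd (pvUpd PySem.Dict.empty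
      (r.filter (fun kv => decide (kv.2 = "york_hereford_bristol"))))
      (r.filter (fun kv => decide (kv.2 = "stgeorge_albion_windsor"))))
      (r.filter (fun kv => decide (kv.2 = "national"))))
      (r.filter (fun kv => decide (kv.2 = "western"))))
      (r.filter (fun kv => decide (kv.2 = "warwick"))))
      (r.filter (fun kv => decide (kv.2 = "american"))))
      (r.filter (fun kv => decide (kv.2 = "stnicholas"))))
      (r.filter (fun kv => decide (kv.2 = "wa1440"))))
      (r.filter (fun kv => decide (kv.2 = "metric1440"))))
      (r.filter (fun kv => decide (kv.2 = "wa900"))))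
      (r.filter (fun kv => decide (kv.2 = "wa720") && !(PySem.Str.isIn "wa720_50_c" kv.1))))
      (r.filter (fun kv => decide (kv.2 = "metric720") && !(PySem.Str.isIn "metric_80" kv.1))))
      (r.filter (fun kv => decide (kv.2 = "wa720") && PySem.Str.isIn "wa720_50_c" kv.1)))
      (r.filter (fun kv => decide (kv.2 = "metric720") && PySem.Str.isIn "metric_80" kv.1)))
      (r.filter (fun kv => decide (kv.2 = "metriclong"))))
      (r.filter (fun kv => decide (kv.2 = "metricshort"))))
      (r.filter (fun kv => decide (kv.2 = "wafield_24_marked"))))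
      (r.filter (fun kv => decide (kv.2 = "wafield_24_unmarked"))))
      (r.filter (fun kv => decide (kv.2 = "wafield_24_mixed"))))
      (r.filter (fun kv => decide (kv.2 = "wafield_12_marked"))))
      (r.filter (fun kv => decide (kv.2 = "wafield_12_unmarked"))))
      (r.filter (fun kv => decide (kv.2 = "wafield_12_mixed"))))
      (r.filter (fun kv => !(PySem.Str.isIn "unit" kv.1))))).items := by
  unfold order_rounds
  simp only [pvAOrder, List.foldl_cons, List.foldl_nil, reduceIte, String.reduceEq]

def pvGG (r : List (String × String)) : List (String × String) := (List.range 24).flatMap (pvGrp r)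

lemma altB (r : List (String × String)) :
    order_rounds_alt r = (pvUpd PySem.Dict.empty (pvGG r)).items := by
  unfold order_rounds_alt pvGG pvUpd
  have hb : ∀ p : Nat, ((r.map (fun kv => (prioAlt kv.1 kv.2, kv))).foldl
      (fun d q => d.modify q.1 [] (· ++ [q.2])) PySem.Dict.empty).getD p [] = pvGrp r p := by
    intro p
    rw [PySem.Dict.getD_foldl_modify_append, PySem.Dict.getD_empty, List.filter_map, List.map_map]
    simp only [List.nil_append, Function.comp_def]
    have hbeq : ∀ (a b : Nat), (a == b) = decide (a = b) := fun a b => by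
      by_cases h : a = b <;> simp [h]
    refine Eq.trans ?_ (List.filter_congr
      (fun (kv : String × String) _ =>
        (hbeq (prioAlt kv.1 kv.2) p : ((prioAlt kv.1 kv.2, kv).1 == p) = decide (pvPr kv = p))))
    simp
  simp only [hb]

lemma grp_perm_all (r : List (String × String)) : (pvGG r).Perm r := by
  refine List.Perm.trans (flat_grp_perm r 24) ?_
  have hall : ∀ kv ∈ r, (decide (pvPr kv < 24)) = true := fun kv _ => decide_eq_true (pvPr_lt kv)
  rw [List.filter_congr hall, List.filter_true]

theorem orders_eq (r : List (String × String)) (hnd : (r.map Prod.fst).Nodup) :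
    order_rounds r = order_rounds_alt r := by
  have hfk : ∀ q : (String × String) → Bool, ((r.filter q).map Prod.fst).Nodup :=
    fun q => List.Nodup.sublist (List.Sublist.map Prod.fst List.filter_sublist) hnd
  have hinj : ∀ {a b : String × String}, a ∈ r → b ∈ r → a.1 = b.1 → a = b :=
    fun ha hb he => proj_inj Prod.fst hnd ha hb he
  have hempty : (PySem.Dict.empty : PySem.Dict String String).items = [] := rfl
  have hofl_items : (PySem.Dict.ofList r).items = r := by
    have hh : PySem.Dict.ofList r = pvUpd PySem.Dict.empty r := rfl
    rw [hh, upd_items r _ PySem.Dict.nodup_keys_empty hnd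
      (fun kv _ hc => by rw [PySem.Dict.contains_empty] at hc; cases hc)]
    simp [PySem.Dict.contains_empty, hempty]
  have hofl_keys : (PySem.Dict.ofList r).keys.Nodup := by
    simp only [PySem.Dict.keys, hofl_items]; exact hnd
  have hgd : ∀ kv ∈ r, (PySem.Dict.ofList r).getD kv.1 "" = kv.2 := by
    intro kv hm
    exact PySem.Dict.getD_of_mem_items _ (by rw [hofl_items]; exact hm) hofl_keys ""
  have e0 : r.filter (fun kv => decide (kv.2 = "york_hereford_bristol")) = pvGrp r 0 :=
    List.filter_congr (fun kv _ => pw_simple "york_hereford_bristol" 0 (by decide) kv)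
  have e1 : r.filter (fun kv => decide (kv.2 = "stgeorge_albion_windsor")) = pvGrp r 1 :=
    List.filter_congr (fun kv _ => pw_simple "stgeorge_albion_windsor" 1 (by decide) kv)
  have e2 : r.filter (fun kv => decide (kv.2 = "national")) = pvGrp r 2 :=
    List.filter_congr (fun kv _ => pw_simple "national" 2 (by decide) kv)
  have e3 : r.filter (fun kv => decide (kv.2 = "western")) = pvGrp r 3 :=
    List.filter_congr (fun kv _ => pw_simple "western" 3 (by decide) kv)
  have e4 : r.filter (fun kv => decide (kv.2 = "warwick")) = pvGrp r 4 :=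
    List.filter_congr (fun kv _ => pw_simple "warwick" 4 (by decide) kv)
  have e5 : r.filter (fun kv => decide (kv.2 = "american")) = pvGrp r 5 :=
    List.filter_congr (fun kv _ => pw_simple "american" 5 (by decide) kv)
  have e6 : r.filter (fun kv => decide (kv.2 = "stnicholas")) = pvGrp r 6 :=
    List.filter_congr (fun kv _ => pw_simple "stnicholas" 6 (by decide) kv)
  have e7 : r.filter (fun kv => decide (kv.2 = "wa1440")) = pvGrp r 7 :=
    List.filter_congr (fun kv _ => pw_simple "wa1440" 7 (by decide) kv)
  have e8 : r.filter (fun kv => decide (kv.2 = "metric1440")) = pvGrp r 8 :=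
    List.filter_congr (fun kv _ => pw_simple "metric1440" 8 (by decide) kv)
  have e9 : r.filter (fun kv => decide (kv.2 = "wa900")) = pvGrp r 9 :=
    List.filter_congr (fun kv _ => pw_simple "wa900" 9 (by decide) kv)
  have e14 : r.filter (fun kv => decide (kv.2 = "metriclong")) = pvGrp r 14 :=
    List.filter_congr (fun kv _ => pw_simple "metriclong" 14 (by decide) kv)
  have e15 : r.filter (fun kv => decide (kv.2 = "metricshort")) = pvGrp r 15 :=
    List.filter_congr (fun kv _ => pw_simple "metricshort" 15 (by decide) kv)
  have e16 : r.filter (fun kv => decide (kv.2 = "wafield_24_marked")) = pvGrp r 16 :=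
    List.filter_congr (fun kv _ => pw_simple "wafield_24_marked" 16 (by decide) kv)
  have e17 : r.filter (fun kv => decide (kv.2 = "wafield_24_unmarked")) = pvGrp r 17 :=
    List.filter_congr (fun kv _ => pw_simple "wafield_24_unmarked" 17 (by decide) kv)
  have e18 : r.filter (fun kv => decide (kv.2 = "wafield_24_mixed")) = pvGrp r 18 :=
    List.filter_congr (fun kv _ => pw_simple "wafield_24_mixed" 18 (by decide) kv)
  have e19 : r.filter (fun kv => decide (kv.2 = "wafield_12_marked")) = pvGrp r 19 :=
    List.filter_congr (fun kv _ => pw_simple "wafield_12_marked" 19 (by decide) kv)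
  have e20 : r.filter (fun kv => decide (kv.2 = "wafield_12_unmarked")) = pvGrp r 20 :=
    List.filter_congr (fun kv _ => pw_simple "wafield_12_unmarked" 20 (by decide) kv)
  have e21 : r.filter (fun kv => decide (kv.2 = "wafield_12_mixed")) = pvGrp r 21 :=
    List.filter_congr (fun kv _ => pw_simple "wafield_12_mixed" 21 (by decide) kv)
  have e10 : r.filter (fun kv => decide (kv.2 = "wa720") && !(PySem.Str.isIn "wa720_50_c" kv.1)) = pvGrp r 10 :=
    List.filter_congr (fun kv _ => pw_10 kv)
  have e11 : r.filter (fun kv => decide (kv.2 = "metric720") && !(PySem.Str.isIn "metric_80" kv.1)) = pvGrp r 11 :=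
    List.filter_congr (fun kv _ => pw_11 kv)
  have e12 : r.filter (fun kv => decide (kv.2 = "wa720") && PySem.Str.isIn "wa720_50_c" kv.1) = pvGrp r 12 :=
    List.filter_congr (fun kv _ => pw_12 kv)
  have e13 : r.filter (fun kv => decide (kv.2 = "metric720") && PySem.Str.isIn "metric_80" kv.1) = pvGrp r 13 :=
    List.filter_congr (fun kv _ => pw_13 kv)
  rw [orderA r]
  have hcat : ∀ (X : PySem.Dict String String),
      List.foldl (fun d kv => d.insert kv.1 ((PySem.Dict.ofList r).getD kv.1 "")) X r
        = pvUpd X r := by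
    intro X
    refine PySem.List.foldl_congr_mem r _ _ X ?_
    intro acc kv hm; rw [hgd kv hm]
  rw [hcat]
  rw [e0, e1, e2, e3, e4, e5, e6, e7, e8, e9, e10, e11, e12, e13, e14, e15, e16, e17, e18, e19, e20, e21]
  rw [chain22 r]
  set C := (List.range 22).flatMap (pvGrp r) with hCdef
  have hCperm : C.Perm (r.filter (fun kv => decide (pvPr kv < 22))) := flat_grp_perm r 22
  have hCmem : ∀ kv ∈ r, (kv ∈ C ↔ pvPr kv < 22) := by
    intro kv hmr
    rw [hCperm.mem_iff, List.mem_filter]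
    constructor
    · intro h; exact of_decide_eq_true h.2
    · intro h; exact ⟨hmr, decide_eq_true h⟩
  have hCsub : ∀ kv ∈ C, kv ∈ r := by
    intro kv hm
    exact (List.mem_filter.mp (hCperm.mem_iff.mp hm)).1
  have hCkeys : (C.map Prod.fst).Nodup := ((hCperm.map Prod.fst).nodup_iff).mpr (hfk _)
  have hCitems : (pvUpd PySem.Dict.empty C).items = C := by
    rw [upd_items C _ PySem.Dict.nodup_keys_empty hCkeys
      (fun kv _ hc => by rw [PySem.Dict.contains_empty] at hc; cases hc)]
    simp [PySem.Dict.contains_empty, hempty]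
  have hCkeysd : (pvUpd PySem.Dict.empty C).keys.Nodup := by
    simp only [PySem.Dict.keys, hCitems]; exact hCkeys
  have hCcont : ∀ kv ∈ r, ((pvUpd PySem.Dict.empty C).contains kv.1 = true ↔ pvPr kv < 22) := by
    intro kv hmr
    rw [PySem.Dict.contains_iff_mem_keys]
    simp only [PySem.Dict.keys, hCitems]
    constructor
    · intro hk
      rcases List.mem_map.mp hk with ⟨kv', hmC, he⟩
      have hkv : kv' = kv := hinj (hCsub kv' hmC) hmr he
      rw [hkv] at hmC
      exact (hCmem kv hmr).mp hmC
    · intro h; exact List.mem_map_of_mem ((hCmem kv hmr).mpr h)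
  have hCget : ∀ kv ∈ r, pvPr kv < 22 → (pvUpd PySem.Dict.empty C).get? kv.1 = some kv.2 := by
    intro kv hmr h
    exact PySem.Dict.get?_of_mem_items _ (by rw [hCitems]; exact (hCmem kv hmr).mpr h) hCkeysd
  have h22 : (pvUpd (pvUpd PySem.Dict.empty C)
      (r.filter (fun kv => !(PySem.Str.isIn "unit" kv.1)))).items = C ++ pvGrp r 22 := by
    rw [upd_items _ _ hCkeysd (hfk _) ?_]
    · rw [hCitems]; congr 1
      rw [List.filter_filter]
      apply List.filter_congr
      intro kv hmr
      have hc : (pvUpd PySem.Dict.empty C).contains kv.1 = decide (pvPr kv < 22) := by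
        by_cases h : pvPr kv < 22
        · rw [decide_eq_true h]; exact (hCcont kv hmr).mpr h
        · rw [decide_eq_false h]
          rcases hb : (pvUpd PySem.Dict.empty C).contains kv.1 with _ | _
          · rfl
          · exact absurd ((hCcont kv hmr).mp hb) h
      rw [hc, Bool.and_comm]
      exact pw_22 kv
    · intro kv hm hc
      have hmr := List.mem_of_mem_filter hm
      exact hCget kv hmr ((hCcont kv hmr).mp hc)
  set D2 := pvUpd (pvUpd PySem.Dict.empty C)
      (r.filter (fun kv => !(PySem.Str.isIn "unit" kv.1))) with hD2def
  have hC'perm : (C ++ pvGrp r 22).Perm (r.filter (fun kv => decide (pvPr kv < 23))) := by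
    refine List.Perm.trans (hCperm.append_right _) (List.Perm.trans (filter_or_perm _ _ _ ?_) ?_)
    · intro kv _ hcon
      have h1 := of_decide_eq_true hcon.1
      have h2 := of_decide_eq_true hcon.2
      omega
    · rw [List.filter_congr (fun (kv : String × String) _ => ?_)]
      rw [← Bool.decide_or]
      exact decide_eq_decide.mpr (by omega)
  have hC'mem : ∀ kv ∈ r, (kv ∈ C ++ pvGrp r 22 ↔ pvPr kv < 23) := by
    intro kv hmr
    rw [hC'perm.mem_iff, List.mem_filter]
    constructor
    · intro h; exact of_decide_eq_true h.2
    · intro h; exact ⟨hmr, decide_eq_true h⟩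
  have hC'sub : ∀ kv ∈ C ++ pvGrp r 22, kv ∈ r := by
    intro kv hm
    exact (List.mem_filter.mp (hC'perm.mem_iff.mp hm)).1
  have hC'keys : ((C ++ pvGrp r 22).map Prod.fst).Nodup :=
    ((hC'perm.map Prod.fst).nodup_iff).mpr (hfk _)
  have hD2keys : D2.keys.Nodup := by
    simp only [PySem.Dict.keys, h22]; exact hC'keys
  have hD2cont : ∀ kv ∈ r, (D2.contains kv.1 = true ↔ pvPr kv < 23) := by
    intro kv hmr
    rw [PySem.Dict.contains_iff_mem_keys]
    simp only [PySem.Dict.keys, h22]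
    constructor
    · intro hk
      rcases List.mem_map.mp hk with ⟨kv', hmC, he⟩
      have hkv : kv' = kv := hinj (hC'sub kv' hmC) hmr he
      rw [hkv] at hmC
      exact (hC'mem kv hmr).mp hmC
    · intro h; exact List.mem_map_of_mem ((hC'mem kv hmr).mpr h)
  have hD2get : ∀ kv ∈ r, pvPr kv < 23 → D2.get? kv.1 = some kv.2 := by
    intro kv hmr h
    refine PySem.Dict.get?_of_mem_items _ ?_ hD2keys
    rw [h22]
    exact (hC'mem kv hmr).mpr h
  have h23 : (pvUpd D2 r).items = (C ++ pvGrp r 22) ++ pvGrp r 23 := by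
    rw [upd_items _ _ hD2keys hnd ?_]
    · rw [h22]; congr 1
      apply List.filter_congr
      intro kv hmr
      have hc : D2.contains kv.1 = decide (pvPr kv < 23) := by
        by_cases h : pvPr kv < 23
        · rw [decide_eq_true h]; exact (hD2cont kv hmr).mpr h
        · rw [decide_eq_false h]
          rcases hb : D2.contains kv.1 with _ | _
          · rfl
          · exact absurd ((hD2cont kv hmr).mp hb) h
      rw [hc]
      exact pw_23 kv
    · intro kv hm hc
      exact hD2get kv hm ((hD2cont kv hm).mp hc)
  have hGGkeys : ((pvGG r).map Prod.fst).Nodup :=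
    (((grp_perm_all r).map Prod.fst).nodup_iff).mpr hnd
  have hGGitems : (pvUpd PySem.Dict.empty (pvGG r)).items = pvGG r := by
    rw [upd_items _ _ PySem.Dict.nodup_keys_empty hGGkeys
      (fun kv _ hc => by rw [PySem.Dict.contains_empty] at hc; cases hc)]
    simp [PySem.Dict.contains_empty, hempty]
  have hGGsplit : pvGG r = (C ++ pvGrp r 22) ++ pvGrp r 23 := by
    rw [hCdef]
    unfold pvGG
    simp [List.range_succ, List.flatMap_cons, List.flatMap_nil, List.append_nil,
          List.append_assoc]
  rw [altB r, hGGitems, hGGsplit]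
  exact h23

-- ===== VERDICT (by name: the statement is the Claim_ definition above) =====
theorem order_rounds_spec : Claim_equal_order_rounds := by
  intro r _ hpre
  unfold Spec_order_rounds
  exact orders_eq r hpre
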